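-- pv_equiv track=rewrite | github.com/KenKarrasch/EverybodyCodes | 2025/DucksAndDragonsDay12-2.py | compute_reachable
-- ===== SOURCE A (Python) =====
-- from collections import deque
--
-- def compute_reachable(grid, start):
--     rows, cols = len(grid), len(grid[0])
--     r, c = start
--     q = deque([(r, c)])
--     visited = set([(r, c)])
--     while q:
--         x, y = q.popleft()
--         for dx, dy in [(1,0), (-1,0), (0,1), (0,-1)]:
--             nx, ny = x + dx, y + dy
--             if 0 <= nx < rows and 0 <= ny < cols:
--                 if (nx, ny) not in visited and grid[nx][ny] <= grid[x][y]:
--                     visited.add((nx, ny))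
--                     q.append((nx, ny))
--     return visited
-- ===== SOURCE B (Python) =====
-- def compute_reachable(grid, start):
--     rows, cols = len(grid), len(grid[0])
--     visited = {start}
--     def dfs(x, y):
--         for dx, dy in ((1, 0), (-1, 0), (0, 1), (0, -1)):
--             nx, ny = x + dx, y + dy
--             if 0 <= nx < rows and 0 <= ny < cols \
--                     and (nx, ny) not in visited and grid[nx][ny] <= grid[x][y]:
--                 visited.add((nx, ny))
--                 dfs(nx, ny)
--     dfs(*start)
--     return visited
-- ===== Notes on version B (the rewrite author's own statement) =====
-- stated objective: alternative
-- what changed: Replaces the deque-driven breadth-first loop with a recursive depth-first flood fill: an inner dfs(x, y) helper recurses into each in-bounds, unvisited, lower-or-equal neighbour, so the explicit FIFO queue disappears entirely.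
-- outside the precondition, e.g. on compute_reachable([[5, 9], [7]], (0, 0)): A returns {(0, 0)}, B returns {(0, 0)}
import Mathlib
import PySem

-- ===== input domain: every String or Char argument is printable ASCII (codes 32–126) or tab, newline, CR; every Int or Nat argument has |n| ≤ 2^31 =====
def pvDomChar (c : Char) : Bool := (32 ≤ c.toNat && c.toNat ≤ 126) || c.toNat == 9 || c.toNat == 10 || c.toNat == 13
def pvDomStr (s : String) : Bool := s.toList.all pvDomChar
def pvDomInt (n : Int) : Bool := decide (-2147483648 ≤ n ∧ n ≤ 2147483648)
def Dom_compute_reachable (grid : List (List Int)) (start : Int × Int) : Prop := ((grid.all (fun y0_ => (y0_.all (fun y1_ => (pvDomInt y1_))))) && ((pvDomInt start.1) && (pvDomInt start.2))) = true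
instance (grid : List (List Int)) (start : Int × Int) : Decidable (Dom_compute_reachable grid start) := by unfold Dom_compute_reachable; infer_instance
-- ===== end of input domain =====

-- B replaces A's deque-driven BFS by a recursive depth-first flood fill (no queue); equal as a
-- set.  Python returns a set (iteration order unspecified, not modelled): both ports emit the
-- set in the same fixed order (start first, then row-major).

-- ===== shared helpers =====
def pvDirs : List (Int × Int) := [(1, 0), (-1, 0), (0, 1), (0, -1)]

-- grid[x][y] (total here; Pre_ keeps every access either Python makes in Python's index range)
def pvGat (grid : List (List Int)) (x y : Int) : Int :=
  PySem.List.pyGetD (PySem.List.pyGetD grid x []) y 0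

-- the grid rectangle in row-major order (canonicalises the set output; also sizes B's fuel)
def pvCells (rows cols : Int) : List (Int × Int) :=
  (PySem.List.pyRange 0 rows 1).flatMap (fun x => (PySem.List.pyRange 0 cols 1).map (fun y => (x, y)))

-- number of rectangle cells not yet visited (termination measure of A's loop; bounds B's depth)
def pvUncov (rows cols : Int) (vis : PySem.Set (Int × Int)) : Nat :=
  ((pvCells rows cols).filter (fun c => decide (c ∉ vis))).length

lemma mem_pvCells (rows cols : Int) (c : Int × Int) :
    c ∈ pvCells rows cols ↔ 0 ≤ c.1 ∧ c.1 < rows ∧ 0 ≤ c.2 ∧ c.2 < cols := by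
  cases c with
  | mk a b =>
    simp only [pvCells, List.mem_flatMap, List.mem_map, Prod.mk.injEq]
    constructor
    · rintro ⟨x, hx, y, hy, rfl, rfl⟩
      have hx' := PySem.List.mem_pyRange_one.mp hx
      have hy' := PySem.List.mem_pyRange_one.mp hy
      exact ⟨hx'.1, hx'.2, hy'.1, hy'.2⟩
    · rintro ⟨h1, h2, h3, h4⟩
      exact ⟨a, PySem.List.mem_pyRange_one.mpr ⟨h1, h2⟩, b,
        PySem.List.mem_pyRange_one.mpr ⟨h3, h4⟩, rfl, rfl⟩

lemma pvUncov_add_lt (rows cols : Int) (vis : PySem.Set (Int × Int)) (c : Int × Int)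
    (hc : c ∈ pvCells rows cols) (hnv : c ∉ vis) :
    pvUncov rows cols (PySem.Set.add vis c) < pvUncov rows cols vis := by
  have hadd : PySem.Set.add vis c = vis ++ [c] := by simp [PySem.Set.add, hnv]
  unfold pvUncov
  rw [hadd]
  have hfe : (pvCells rows cols).filter (fun x => decide (x ∉ vis ++ [c]))
      = ((pvCells rows cols).filter (fun x => decide (x ∉ vis))).filter (fun x => decide (x ≠ c)) := by
    rw [List.filter_filter]
    apply List.filter_congr
    intro x hx
    by_cases h1 : x ∈ vis <;> by_cases h2 : x = c <;> simp [h1, h2, List.mem_append]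
  rw [hfe]
  exact List.length_filter_lt_length_iff_exists.mpr
    ⟨c, List.mem_filter.mpr ⟨hc, by simp [hnv]⟩, by simp⟩

-- Python returns the visited SET: emit it in the fixed order "start first, then row-major"
def pvCanon (rows cols : Int) (start : Int × Int) (vis : PySem.Set (Int × Int)) : List (Int × Int) :=
  start :: (pvCells rows cols).filter (fun c => decide (c ≠ start) && decide (c ∈ vis))

-- ===== PORT A (BFS with a FIFO queue, transliterating the Python) =====
-- one direction (dx, dy) of the inner 'for'; state = (visited, rest-of-queue)
def pvBfsStep (grid : List (List Int)) (rows cols x y : Int)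
    (st : PySem.Set (Int × Int) × List (Int × Int)) (d : Int × Int) :
    PySem.Set (Int × Int) × List (Int × Int) :=
  if 0 ≤ x + d.1 ∧ x + d.1 < rows ∧ 0 ≤ y + d.2 ∧ y + d.2 < cols ∧
      (x + d.1, y + d.2) ∉ st.1 ∧ pvGat grid (x + d.1) (y + d.2) ≤ pvGat grid x y
  then (PySem.Set.add st.1 (x + d.1, y + d.2), st.2 ++ [(x + d.1, y + d.2)])
  else st

def pvBfsVisit (grid : List (List Int)) (rows cols x y : Int)
    (st : PySem.Set (Int × Int) × List (Int × Int)) :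
    PySem.Set (Int × Int) × List (Int × Int) :=
  pvDirs.foldl (pvBfsStep grid rows cols x y) st

lemma pvBfsStep_measure (grid : List (List Int)) (rows cols x y : Int) :
    ∀ (dirs : List (Int × Int)) (st : PySem.Set (Int × Int) × List (Int × Int)),
      2 * pvUncov rows cols (List.foldl (pvBfsStep grid rows cols x y) st dirs).1 +
        (List.foldl (pvBfsStep grid rows cols x y) st dirs).2.length ≤
      2 * pvUncov rows cols st.1 + st.2.length := by
  intro dirs
  induction dirs with
  | nil => intro st; simp
  | cons d ds ih =>
    intro st
    have hstep : 2 * pvUncov rows cols (pvBfsStep grid rows cols x y st d).1 +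
        (pvBfsStep grid rows cols x y st d).2.length ≤
        2 * pvUncov rows cols st.1 + st.2.length := by
      unfold pvBfsStep
      split_ifs with h
      · have hlt : pvUncov rows cols (PySem.Set.add st.1 (x + d.1, y + d.2)) <
            pvUncov rows cols st.1 :=
          pvUncov_add_lt rows cols st.1 _
            ((mem_pvCells rows cols _).mpr ⟨h.1, h.2.1, h.2.2.1, h.2.2.2.1⟩) h.2.2.2.2.1
        simp only [List.length_append, List.length_cons, List.length_nil]
        omega
      · omega
    calc 2 * pvUncov rows cols (List.foldl (pvBfsStep grid rows cols x y) st (d :: ds)).1 +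
          (List.foldl (pvBfsStep grid rows cols x y) st (d :: ds)).2.length
        = 2 * pvUncov rows cols (List.foldl (pvBfsStep grid rows cols x y)
              (pvBfsStep grid rows cols x y st d) ds).1 +
          (List.foldl (pvBfsStep grid rows cols x y)
              (pvBfsStep grid rows cols x y st d) ds).2.length := by
          simp [List.foldl_cons]
      _ ≤ 2 * pvUncov rows cols (pvBfsStep grid rows cols x y st d).1 +
            (pvBfsStep grid rows cols x y st d).2.length := ih _
      _ ≤ 2 * pvUncov rows cols st.1 + st.2.length := hstep

-- 'while q:' — pop from the front, scan the four directions, push new cells at the back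
def pvBfsLoop (grid : List (List Int)) (rows cols : Int) :
    List (Int × Int) → PySem.Set (Int × Int) → PySem.Set (Int × Int)
  | [], vis => vis
  | (x, y) :: q, vis =>
      pvBfsLoop grid rows cols (pvBfsVisit grid rows cols x y (vis, q)).2
        (pvBfsVisit grid rows cols x y (vis, q)).1
termination_by q vis => 2 * pvUncov rows cols vis + q.length
decreasing_by
  have h : 2 * pvUncov rows cols (List.foldl (pvBfsStep grid rows cols x y) (vis, q) pvDirs).1 +
      (List.foldl (pvBfsStep grid rows cols x y) (vis, q) pvDirs).2.length ≤
      2 * pvUncov rows cols vis + q.length := pvBfsStep_measure grid rows cols x y pvDirs (vis, q)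
  simp only [pvBfsVisit, List.length_cons]
  omega

def compute_reachable (grid : List (List Int)) (start : Int × Int) : List (Int × Int) :=
  pvCanon (grid.length : Int) ((PySem.List.pyGetD grid 0 []).length : Int) start
    (pvBfsLoop grid (grid.length : Int) ((PySem.List.pyGetD grid 0 []).length : Int)
      [start] (PySem.Set.ofList [start]))

-- ===== PORT B (recursive depth-first flood fill; fuel is only a totality guard, always ample) =====
mutual
-- the body of Source B's dfs(x, y): try the four directions in order
def pvDfsCell (grid : List (List Int)) (rows cols : Int) :
    Nat → Int → Int → PySem.Set (Int × Int) → PySem.Set (Int × Int)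
  | 0, _, _, vis => vis
  | Nat.succ fuel, x, y, vis => pvDfsDirs grid rows cols fuel pvDirs x y vis
termination_by fuel x y vis => (fuel, 0, 0)

-- one direction: if the neighbour qualifies, mark it visited and recurse into it
def pvDfsDirs (grid : List (List Int)) (rows cols : Int) :
    Nat → List (Int × Int) → Int → Int → PySem.Set (Int × Int) → PySem.Set (Int × Int)
  | _, [], _, _, vis => vis
  | fuel, d :: ds, x, y, vis =>
      if 0 ≤ x + d.1 ∧ x + d.1 < rows ∧ 0 ≤ y + d.2 ∧ y + d.2 < cols ∧
          (x + d.1, y + d.2) ∉ vis ∧ pvGat grid (x + d.1) (y + d.2) ≤ pvGat grid x y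
      then pvDfsDirs grid rows cols fuel ds x y
        (pvDfsCell grid rows cols fuel (x + d.1) (y + d.2)
          (PySem.Set.add vis (x + d.1, y + d.2)))
      else pvDfsDirs grid rows cols fuel ds x y vis
termination_by fuel ds x y vis => (fuel, 1, ds.length)
end

def compute_reachable_alt (grid : List (List Int)) (start : Int × Int) : List (Int × Int) :=
  pvCanon (grid.length : Int) ((PySem.List.pyGetD grid 0 []).length : Int) start
    (pvDfsCell grid (grid.length : Int) ((PySem.List.pyGetD grid 0 []).length : Int)
      ((pvCells (grid.length : Int) ((PySem.List.pyGetD grid 0 []).length : Int)).length + 1)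
      start.1 start.2 (PySem.Set.ofList [start]))

-- ===== PRECONDITION & SPEC =====
-- Pre_ excludes: the empty grid (A raises IndexError); grids having a row shorter than row 0
-- when the start has an in-rectangle neighbour (whether A returns or raises then depends on the
-- flood's path, so A raises on some of them); and starts whose own Python index lookup is out of
-- range while a neighbour is in range (A raises IndexError there).  Starts with NO in-rectangle
-- neighbour are kept for every grid: A indexes nothing and returns {start}.
def Pre_compute_reachable (grid : List (List Int)) (start : Int × Int) : Prop :=
  grid ≠ [] ∧
  ((¬ ∃ d ∈ pvDirs, 0 ≤ start.1 + d.1 ∧ start.1 + d.1 < (grid.length : Int) ∧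
      0 ≤ start.2 + d.2 ∧ start.2 + d.2 < ((PySem.List.pyGetD grid 0 []).length : Int)) ∨
    ((∀ row ∈ grid, (PySem.List.pyGetD grid 0 []).length ≤ row.length) ∧
      -(grid.length : Int) ≤ start.1 ∧ start.1 < (grid.length : Int) ∧
      -((PySem.List.pyGetD grid 0 []).length : Int) ≤ start.2 ∧
      start.2 < ((PySem.List.pyGetD grid 0 []).length : Int)))

instance (grid : List (List Int)) (start : Int × Int) :
    Decidable (Pre_compute_reachable grid start) := by
  unfold Pre_compute_reachable; infer_instance

def pvWitness_compute_reachable : List (List Int) × (Int × Int) := ([[3, 1], [2, 5]], (0, 0))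

def Spec_compute_reachable (grid : List (List Int)) (start : Int × Int)
    (out : List (Int × Int)) : Prop :=
  out = compute_reachable_alt grid start

instance (grid : List (List Int)) (start : Int × Int) (out : List (Int × Int)) :
    Decidable (Spec_compute_reachable grid start out) := by
  unfold Spec_compute_reachable; infer_instance

-- ===== CLAIM (what is proved, stated in full; the proof is below) =====
def Claim_equal_compute_reachable : Prop := ∀ (grid : List (List Int)) (start : Int × Int), Dom_compute_reachable grid start → Pre_compute_reachable grid start → Spec_compute_reachable grid start (compute_reachable grid start)

-- ===== LEMMAS AND PROOFS =====

def pvInRect (rows cols : Int) (w : Int × Int) : Prop :=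
  0 ≤ w.1 ∧ w.1 < rows ∧ 0 ≤ w.2 ∧ w.2 < cols

-- the edge relation both programs flood: one step from p to a lower-or-equal in-bounds neighbour w
def pvAdj (grid : List (List Int)) (rows cols : Int) (p w : Int × Int) : Prop :=
  (∃ d ∈ pvDirs, w = (p.1 + d.1, p.2 + d.2)) ∧ pvInRect rows cols w ∧
    pvGat grid w.1 w.2 ≤ pvGat grid p.1 p.2

lemma pvBfsStep_cases (grid : List (List Int)) (rows cols x y : Int)
    (st : PySem.Set (Int × Int) × List (Int × Int)) (d : Int × Int) :
    (pvBfsStep grid rows cols x y st d = st ∧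
      ((0 ≤ x + d.1 ∧ x + d.1 < rows ∧ 0 ≤ y + d.2 ∧ y + d.2 < cols ∧
        pvGat grid (x + d.1) (y + d.2) ≤ pvGat grid x y) → (x + d.1, y + d.2) ∈ st.1)) ∨
    (0 ≤ x + d.1 ∧ x + d.1 < rows ∧ 0 ≤ y + d.2 ∧ y + d.2 < cols ∧
      (x + d.1, y + d.2) ∉ st.1 ∧ pvGat grid (x + d.1) (y + d.2) ≤ pvGat grid x y ∧
      pvBfsStep grid rows cols x y st d =
        (PySem.Set.add st.1 (x + d.1, y + d.2), st.2 ++ [(x + d.1, y + d.2)])) := by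
  unfold pvBfsStep
  split_ifs with h
  · exact Or.inr ⟨h.1, h.2.1, h.2.2.1, h.2.2.2.1, h.2.2.2.2.1, h.2.2.2.2.2, rfl⟩
  · refine Or.inl ⟨rfl, fun hb => ?_⟩
    by_contra hmem
    exact h ⟨hb.1, hb.2.1, hb.2.2.1, hb.2.2.2.1, hmem, hb.2.2.2.2⟩

lemma pvBfsVisit_inv (grid : List (List Int)) (rows cols x y : Int) :
    ∀ (dirs : List (Int × Int)), (∀ d ∈ dirs, d ∈ pvDirs) →
    ∀ (st : PySem.Set (Int × Int) × List (Int × Int)),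
      (∀ v, v ∈ st.1 → v ∈ (List.foldl (pvBfsStep grid rows cols x y) st dirs).1) ∧
      (∀ v, v ∈ st.2 → v ∈ (List.foldl (pvBfsStep grid rows cols x y) st dirs).2) ∧
      (∀ v, v ∈ (List.foldl (pvBfsStep grid rows cols x y) st dirs).1 →
        v ∈ st.1 ∨ (pvAdj grid rows cols (x, y) v ∧
          v ∈ (List.foldl (pvBfsStep grid rows cols x y) st dirs).2)) ∧
      (∀ v, v ∈ (List.foldl (pvBfsStep grid rows cols x y) st dirs).2 →
        v ∈ st.2 ∨ v ∈ (List.foldl (pvBfsStep grid rows cols x y) st dirs).1) ∧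
      (∀ d ∈ dirs, pvInRect rows cols (x + d.1, y + d.2) →
        pvGat grid (x + d.1) (y + d.2) ≤ pvGat grid x y →
        (x + d.1, y + d.2) ∈ (List.foldl (pvBfsStep grid rows cols x y) st dirs).1) := by
  intro dirs
  induction dirs with
  | nil =>
    intro _ st
    exact ⟨fun v hv => hv, fun v hv => hv, fun v hv => Or.inl hv, fun v hv => Or.inl hv, by simp⟩
  | cons d ds ih =>
    intro hd st
    have hdm : d ∈ pvDirs := hd d (by simp)
    have hds : ∀ e ∈ ds, e ∈ pvDirs := fun e he => hd e (by simp [he])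
    obtain ⟨m1, m2, m3, m4, m5⟩ := ih hds (pvBfsStep grid rows cols x y st d)
    simp only [List.foldl_cons]
    rcases pvBfsStep_cases grid rows cols x y st d with ⟨heq, himp⟩ |
      ⟨h1, h2, h3, h4, hnm, hg, heq⟩
    · rw [heq] at m1 m2 m3 m4 m5 ⊢
      refine ⟨m1, m2, m3, m4, ?_⟩
      intro e he hrect hgat
      rcases (by simpa using he : e = d ∨ e ∈ ds) with heD | he'
      · subst heD
        exact m1 _ (himp ⟨hrect.1, hrect.2.1, hrect.2.2.1, hrect.2.2.2, hgat⟩)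
      · exact m5 e he' hrect hgat
    · rw [heq] at m1 m2 m3 m4 m5 ⊢
      have hadj : pvAdj grid rows cols (x, y) (x + d.1, y + d.2) :=
        ⟨⟨d, hdm, rfl⟩, ⟨h1, h2, h3, h4⟩, hg⟩
      refine ⟨?_, ?_, ?_, ?_, ?_⟩
      · intro v hv
        exact m1 v ((PySem.Set.mem_add st.1 (x + d.1, y + d.2) v).mpr (Or.inl hv))
      · intro v hv
        exact m2 v (by simp [hv])
      · intro v hv
        rcases m3 v hv with hvin | hnew
        · rcases (PySem.Set.mem_add st.1 (x + d.1, y + d.2) v).mp hvin with hold | rfl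
          · exact Or.inl hold
          · exact Or.inr ⟨hadj, m2 _ (by simp)⟩
        · exact Or.inr hnew
      · intro v hv
        rcases m4 v hv with hvin | hvF
        · rcases (by simpa using hvin : v ∈ st.2 ∨ v = (x + d.1, y + d.2)) with hvs | rfl
          · exact Or.inl hvs
          · exact Or.inr (m1 _ ((PySem.Set.mem_add st.1 (x + d.1, y + d.2) _).mpr (Or.inr rfl)))
        · exact Or.inr hvF
      · intro e he hrect hgat
        rcases (by simpa using he : e = d ∨ e ∈ ds) with heD | he'
        · subst heD
          exact m1 _ ((PySem.Set.mem_add st.1 (x + e.1, y + e.2) _).mpr (Or.inr rfl))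
        · exact m5 e he' hrect hgat

lemma pvBfsLoop_inv (grid : List (List Int)) (rows cols : Int) (start : Int × Int) :
    ∀ (q : List (Int × Int)) (vis : PySem.Set (Int × Int)),
    (∀ v ∈ q, v ∈ vis) →
    (∀ v ∈ vis, Relation.ReflTransGen (pvAdj grid rows cols) start v) →
    (∀ v ∈ vis, v ∈ q ∨ ∀ w, pvAdj grid rows cols v w → w ∈ vis) →
    (∀ v ∈ vis, v ∈ pvBfsLoop grid rows cols q vis) ∧
    (∀ v ∈ pvBfsLoop grid rows cols q vis,
      Relation.ReflTransGen (pvAdj grid rows cols) start v) ∧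
    (∀ v ∈ pvBfsLoop grid rows cols q vis, ∀ w, pvAdj grid rows cols v w →
      w ∈ pvBfsLoop grid rows cols q vis) := by
  intro q vis
  induction q, vis using pvBfsLoop.induct grid rows cols with
  | case1 vis =>
    intro _ h2 h3
    rw [pvBfsLoop]
    refine ⟨fun v hv => hv, h2, ?_⟩
    intro v hv w hw
    rcases h3 v hv with hq | hcl
    · simp at hq
    · exact hcl w hw
  | case2 x y q vis ih =>
    intro h1 h2 h3
    obtain ⟨m1, m2, m3, m4, m5⟩ :=
      pvBfsVisit_inv grid rows cols x y pvDirs (fun d hd => hd) (vis, q)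
    have hxy : (x, y) ∈ vis := h1 (x, y) (by simp)
    have H1' : ∀ v ∈ (pvBfsVisit grid rows cols x y (vis, q)).2,
        v ∈ (pvBfsVisit grid rows cols x y (vis, q)).1 := by
      intro v hv
      rcases m4 v hv with hvq | hvS
      · exact m1 v (h1 v (by simp [hvq]))
      · exact hvS
    have H2' : ∀ v ∈ (pvBfsVisit grid rows cols x y (vis, q)).1,
        Relation.ReflTransGen (pvAdj grid rows cols) start v := by
      intro v hv
      rcases m3 v hv with hvv | ⟨hadj, _⟩
      · exact h2 v hvv
      · exact (h2 (x, y) hxy).tail hadj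
    have H3' : ∀ v ∈ (pvBfsVisit grid rows cols x y (vis, q)).1,
        v ∈ (pvBfsVisit grid rows cols x y (vis, q)).2 ∨
        ∀ w, pvAdj grid rows cols v w → w ∈ (pvBfsVisit grid rows cols x y (vis, q)).1 := by
      intro v hv
      rcases m3 v hv with hvv | ⟨_, hvS2⟩
      · rcases h3 v hvv with hvq | hcl
        · rcases (by simpa using hvq : v = (x, y) ∨ v ∈ q) with rfl | hq'
          · right
            rintro w ⟨⟨d, hdm, rfl⟩, hrect, hgat⟩
            exact m5 d hdm hrect hgat
          · exact Or.inl (m2 v hq')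
        · right
          intro w hw
          exact m1 w (hcl w hw)
      · exact Or.inl hvS2
    obtain ⟨C1, C2, C3⟩ := ih H1' H2' H3'
    rw [pvBfsLoop]
    exact ⟨fun v hv => C1 v (m1 v hv), C2, C3⟩

-- the BFS run from start: contains start, sound for reachability, and closed under pvAdj
lemma pvBfsRun_inv (grid : List (List Int)) (rows cols : Int) (start : Int × Int) :
    start ∈ pvBfsLoop grid rows cols [start] (PySem.Set.ofList [start]) ∧
    (∀ v ∈ pvBfsLoop grid rows cols [start] (PySem.Set.ofList [start]),
      Relation.ReflTransGen (pvAdj grid rows cols) start v) ∧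
    (∀ v ∈ pvBfsLoop grid rows cols [start] (PySem.Set.ofList [start]), ∀ w,
      pvAdj grid rows cols v w →
      w ∈ pvBfsLoop grid rows cols [start] (PySem.Set.ofList [start])) := by
  have hs0 : start ∈ PySem.Set.ofList [start] := (PySem.Set.mem_ofList _ _).mpr (by simp)
  obtain ⟨h1, h2, h3⟩ := pvBfsLoop_inv grid rows cols start [start] (PySem.Set.ofList [start])
    (by intro v hv; simp at hv; subst hv; exact hs0)
    (by intro v hv
        have hv' : v = start := by simpa using (PySem.Set.mem_ofList _ _).mp hv
        subst hv'; exact Relation.ReflTransGen.refl)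
    (by intro v hv
        left
        have hv' : v = start := by simpa using (PySem.Set.mem_ofList _ _).mp hv
        simp [hv'])
  exact ⟨h1 start hs0, h2, h3⟩

-- the main invariant of B's recursive flood fill, by strong induction on the fuel
lemma pvDfsDirs_inv (grid : List (List Int)) (rows cols : Int) :
    ∀ (fuel : Nat) (x y : Int) (ds : List (Int × Int)), (∀ d ∈ ds, d ∈ pvDirs) →
    ∀ (vis : PySem.Set (Int × Int)), pvUncov rows cols vis ≤ fuel →
      (∀ v ∈ vis, v ∈ pvDfsDirs grid rows cols fuel ds x y vis) ∧
      (∀ v ∈ pvDfsDirs grid rows cols fuel ds x y vis,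
        v ∈ vis ∨ Relation.ReflTransGen (pvAdj grid rows cols) (x, y) v) ∧
      (∀ d ∈ ds, pvInRect rows cols (x + d.1, y + d.2) →
        pvGat grid (x + d.1) (y + d.2) ≤ pvGat grid x y →
        (x + d.1, y + d.2) ∈ pvDfsDirs grid rows cols fuel ds x y vis) ∧
      (∀ v ∈ pvDfsDirs grid rows cols fuel ds x y vis, v ∉ vis →
        ∀ w, pvAdj grid rows cols v w → w ∈ pvDfsDirs grid rows cols fuel ds x y vis) ∧
      pvUncov rows cols (pvDfsDirs grid rows cols fuel ds x y vis) ≤ pvUncov rows cols vis := by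
  intro fuel
  induction fuel using Nat.strong_induction_on with
  | _ fuel IH =>
    intro x y ds
    induction ds with
    | nil =>
      intro _ vis _
      rw [pvDfsDirs]
      exact ⟨fun v hv => hv, fun v hv => Or.inl hv, by simp, fun v hv hnv => absurd hv hnv,
        le_refl _⟩
    | cons d ds ihds =>
      intro hsub vis hfuel
      have hdm : d ∈ pvDirs := hsub d (by simp)
      have hds : ∀ e ∈ ds, e ∈ pvDirs := fun e he => hsub e (by simp [he])
      rw [pvDfsDirs]
      split_ifs with hcond
      · -- the neighbour qualifies: recurse into it, then continue with the remaining dirs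
        obtain ⟨hb1, hb2, hb3, hb4, hnv, hgat⟩ := hcond
        set nbr : Int × Int := (x + d.1, y + d.2) with hnbr
        have hncell : nbr ∈ pvCells rows cols := (mem_pvCells rows cols nbr).mpr ⟨hb1, hb2, hb3, hb4⟩
        have hdrop : pvUncov rows cols (PySem.Set.add vis nbr) < pvUncov rows cols vis :=
          pvUncov_add_lt rows cols vis nbr hncell hnv
        have hadj : pvAdj grid rows cols (x, y) nbr := ⟨⟨d, hdm, rfl⟩, ⟨hb1, hb2, hb3, hb4⟩, hgat⟩
        -- unfold the recursive cell call: the fuel is positive, so it runs its four directions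
        obtain ⟨f, rfl⟩ : ∃ f, fuel = f + 1 := by
          cases fuel with
          | zero => omega
          | succ f => exact ⟨f, rfl⟩
        have hcell : pvDfsCell grid rows cols (f + 1) nbr.1 nbr.2 (PySem.Set.add vis nbr) =
            pvDfsDirs grid rows cols f pvDirs nbr.1 nbr.2 (PySem.Set.add vis nbr) := by
          rw [pvDfsCell]
        obtain ⟨A1, A2, A3, A4, A5⟩ := IH f (by omega) nbr.1 nbr.2 pvDirs (fun e he => he)
          (PySem.Set.add vis nbr) (by omega)
        rw [hcell] at *
        set R' := pvDfsDirs grid rows cols f pvDirs nbr.1 nbr.2 (PySem.Set.add vis nbr) with hR'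
        have hvisR' : ∀ v ∈ vis, v ∈ R' :=
          fun v hv => A1 v ((PySem.Set.mem_add vis nbr v).mpr (Or.inl hv))
        have hnbrR' : nbr ∈ R' := A1 nbr ((PySem.Set.mem_add vis nbr nbr).mpr (Or.inr rfl))
        obtain ⟨B1, B2, B3, B4, B5⟩ := ihds hds R' (by omega)
        refine ⟨?_, ?_, ?_, ?_, ?_⟩
        · exact fun v hv => B1 v (hvisR' v hv)
        · intro v hv
          rcases B2 v hv with hvR' | hreach
          · rcases A2 v hvR' with hvadd | hreach'
            · rcases (PySem.Set.mem_add vis nbr v).mp hvadd with hvv | rfl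
              · exact Or.inl hvv
              · exact Or.inr (Relation.ReflTransGen.refl.tail hadj)
            · refine Or.inr (Relation.ReflTransGen.head hadj ?_)
              simpa using hreach'
          · exact Or.inr hreach
        · intro e he hrect hg
          rcases (by simpa using he : e = d ∨ e ∈ ds) with rfl | he'
          · exact B1 nbr hnbrR'
          · exact B3 e he' hrect hg
        · intro v hv hnvis w hw
          by_cases hvR' : v ∈ R'
          · -- v was settled by the recursive call (or is the neighbour itself)
            apply B1
            by_cases hvadd : v ∈ PySem.Set.add vis nbr
            · have hveq : v = nbr := by
                rcases (PySem.Set.mem_add vis nbr v).mp hvadd with hvv | h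
                · exact absurd hvv hnvis
                · exact h
              subst hveq
              obtain ⟨⟨e, hem, hweq⟩, hrectw, hgw⟩ := hw
              subst hweq
              exact A3 e hem hrectw hgw
            · exact A4 v hvR' hvadd w hw
          · exact B4 v hv hvR' w hw
        · omega
      · -- the neighbour does not qualify: plain continuation on the remaining dirs
        obtain ⟨C1, C2, C3, C4, C5⟩ := ihds hds vis hfuel
        refine ⟨C1, C2, ?_, C4, C5⟩
        intro e he hrect hg
        rcases (by simpa using he : e = d ∨ e ∈ ds) with rfl | he'
        · -- the condition failed though the bounds and height hold: e's neighbour is already visited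
          have hmem : (x + e.1, y + e.2) ∈ vis := by
            by_contra hnm
            exact hcond ⟨hrect.1, hrect.2.1, hrect.2.2.1, hrect.2.2.2, hnm, hg⟩
          exact C1 _ hmem
        · exact C3 e he' hrect hg

-- everything pvAdj-reachable from start lies in any pvAdj-closed superset of {start}
lemma pv_mem_of_reach_closed (grid : List (List Int)) (rows cols : Int) (start : Int × Int)
    (R : PySem.Set (Int × Int)) (h0 : start ∈ R)
    (hcl : ∀ v ∈ R, ∀ w, pvAdj grid rows cols v w → w ∈ R) :
    ∀ v, Relation.ReflTransGen (pvAdj grid rows cols) start v → v ∈ R := by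
  intro v h
  induction h with
  | refl => exact h0
  | tail _ hadj ih => exact hcl _ ih _ hadj

-- the DFS run from start: contains start, sound for reachability, and closed under pvAdj
lemma pvDfsRun_inv (grid : List (List Int)) (rows cols : Int) (start : Int × Int) :
    start ∈ pvDfsCell grid rows cols ((pvCells rows cols).length + 1)
        start.1 start.2 (PySem.Set.ofList [start]) ∧
    (∀ v ∈ pvDfsCell grid rows cols ((pvCells rows cols).length + 1)
        start.1 start.2 (PySem.Set.ofList [start]),
      Relation.ReflTransGen (pvAdj grid rows cols) start v) ∧
    (∀ v ∈ pvDfsCell grid rows cols ((pvCells rows cols).length + 1)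
        start.1 start.2 (PySem.Set.ofList [start]), ∀ w,
      pvAdj grid rows cols v w →
      w ∈ pvDfsCell grid rows cols ((pvCells rows cols).length + 1)
        start.1 start.2 (PySem.Set.ofList [start])) := by
  have hs0 : start ∈ PySem.Set.ofList [start] := (PySem.Set.mem_ofList _ _).mpr (by simp)
  have hcell : pvDfsCell grid rows cols ((pvCells rows cols).length + 1)
      start.1 start.2 (PySem.Set.ofList [start]) =
      pvDfsDirs grid rows cols (pvCells rows cols).length pvDirs
        start.1 start.2 (PySem.Set.ofList [start]) := by
    rw [pvDfsCell]
  have hfuel : pvUncov rows cols (PySem.Set.ofList [start]) ≤ (pvCells rows cols).length :=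
    List.length_filter_le _ _
  obtain ⟨A1, A2, A3, A4, _⟩ := pvDfsDirs_inv grid rows cols (pvCells rows cols).length
    start.1 start.2 pvDirs (fun d hd => hd) (PySem.Set.ofList [start]) hfuel
  rw [hcell]
  have hstart : (start.1, start.2) = start := Prod.mk.eta
  refine ⟨A1 start hs0, ?_, ?_⟩
  · intro v hv
    rcases A2 v hv with hvv | hreach
    · have hv' : v = start := by simpa using (PySem.Set.mem_ofList _ _).mp hvv
      subst hv'; exact Relation.ReflTransGen.refl
    · rwa [hstart] at hreach
  · intro v hv w hw
    by_cases hvv : v ∈ PySem.Set.ofList [start]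
    · have hv' : v = start := by simpa using (PySem.Set.mem_ofList _ _).mp hvv
      subst hv'
      obtain ⟨⟨d, hdm, hweq⟩, hrectw, hgw⟩ := hw
      subst hweq
      exact A3 d hdm hrectw hgw
    · exact A4 v hv hvv w hw

-- ===== VERDICT (by name: the statement is the Claim_ definition above) =====
theorem compute_reachable_spec : Claim_equal_compute_reachable := by
  unfold Claim_equal_compute_reachable
  intro grid start _ _
  unfold Spec_compute_reachable compute_reachable compute_reachable_alt
  set rows := (grid.length : Int)
  set cols := ((PySem.List.pyGetD grid 0 []).length : Int)
  obtain ⟨hAs, hA2, hA3⟩ := pvBfsRun_inv grid rows cols start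
  obtain ⟨hBs, hB2, hB3⟩ := pvDfsRun_inv grid rows cols start
  set RA := pvBfsLoop grid rows cols [start] (PySem.Set.ofList [start])
  set RB := pvDfsCell grid rows cols ((pvCells rows cols).length + 1)
    start.1 start.2 (PySem.Set.ofList [start])
  have hmem : ∀ c, (c ∈ RA ↔ c ∈ RB) := by
    intro c
    constructor
    · intro h
      exact pv_mem_of_reach_closed grid rows cols start RB hBs hB3 c (hA2 c h)
    · intro h
      exact pv_mem_of_reach_closed grid rows cols start RA hAs hA3 c (hB2 c h)
  unfold pvCanon
  congr 1
  apply List.filter_congr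
  intro c _
  rw [show decide (c ∈ RA) = decide (c ∈ RB) from decide_eq_decide.mpr (hmem c)]
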